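-- pv_equiv track=rewrite | github.com/khanhnam-nathan/Pyneat | pyneat/rules/refactoring.py | _count_nesting
-- ===== SOURCE A (Python) =====
-- def _count_nesting(lines: list, min_indent: int = 0) -> int:
--     """Count nesting level in a block of lines."""
--     max_nesting = 0
--     current_nesting = 0
--
--     for line in lines:
--         stripped = line.strip()
--         indent = len(line) - len(line.lstrip())
--         if indent < min_indent:
--             break
--         if stripped.startswith('if ') or stripped.startswith('elif '):
--             current_nesting += 1
--             max_nesting = max(max_nesting, current_nesting)
--         elif stripped.startswith('else:'):
--             current_nesting += 1
--             max_nesting = max(max_nesting, current_nesting)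
--         elif stripped and not line.startswith('    ') and not line.startswith('\t'):
--             break
--
--     return max_nesting
-- ===== SOURCE B (Python) =====
-- def _count_nesting(lines: list, min_indent: int = 0) -> int:
--     """Count nesting level in a block of lines."""
--     def classify(line):
--         s = line.strip()
--         if len(line) - len(line.lstrip()) < min_indent:
--             return 'stop'
--         if s.startswith(('if ', 'elif ')) or s.startswith('else:'):
--             return 'branch'
--         if s and not line.startswith(('    ', '\t')):
--             return 'stop'
--         return 'skip'
--
--     # Right fold: a 'stop' line wipes out everything counted behind it,
--     # so the final value is the branch count of the prefix before the first stop.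
--     nesting = 0
--     for line in reversed(lines):
--         k = classify(line)
--         if k == 'stop':
--             nesting = 0
--         elif k == 'branch':
--             nesting += 1
--     return nesting
-- ===== Notes on version B (the rewrite author's own statement) =====
-- stated objective: alternative
-- what changed: Replaces A's forward loop with early break and a running max over two counters by a backward (right-fold) scan with no break: each line is classified once, a 'stop' line resets the tally to 0 (cancelling everything after the first stop), a branch line adds 1.
import Mathlib
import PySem

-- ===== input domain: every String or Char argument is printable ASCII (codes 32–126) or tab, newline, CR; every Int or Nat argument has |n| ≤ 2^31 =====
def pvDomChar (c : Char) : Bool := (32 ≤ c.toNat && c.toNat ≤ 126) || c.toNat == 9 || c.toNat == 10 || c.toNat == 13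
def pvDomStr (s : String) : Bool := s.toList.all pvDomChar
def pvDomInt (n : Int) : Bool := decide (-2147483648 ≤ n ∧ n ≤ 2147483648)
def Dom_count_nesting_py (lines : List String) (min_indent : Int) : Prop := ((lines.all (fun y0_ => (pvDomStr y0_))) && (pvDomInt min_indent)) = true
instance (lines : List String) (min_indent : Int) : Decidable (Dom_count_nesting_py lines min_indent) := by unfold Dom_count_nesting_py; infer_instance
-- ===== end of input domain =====

-- B replaces A's forward break-and-running-max loop with a backward right-fold scan
-- (a stop line resets the tally, a branch line adds 1): an alternative of the same cost.

-- ===== PORT A =====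
-- A's for-loop with early break, carrying (max_nesting, current_nesting).
def countNestLoopA (min_indent : Int) : List String → Int → Int → Int
  | [], maxN, _ => maxN
  | line :: rest, maxN, curN =>
    let stripped := PySem.Str.strip line
    let indent := PySem.Str.len line - PySem.Str.len (PySem.Str.lstrip line)
    if indent < min_indent then maxN
    else if PySem.Str.startswith stripped "if " || PySem.Str.startswith stripped "elif " then
      countNestLoopA min_indent rest (max maxN (curN + 1)) (curN + 1)
    else if PySem.Str.startswith stripped "else:" then
      countNestLoopA min_indent rest (max maxN (curN + 1)) (curN + 1)
    else if PySem.Str.len stripped ≠ 0 && !(PySem.Str.startswith line "    ") && !(PySem.Str.startswith line "\t") then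
      maxN
    else countNestLoopA min_indent rest maxN curN

def count_nesting_py (lines : List String) (min_indent : Int) : Int :=
  countNestLoopA min_indent lines 0 0

-- ===== PORT B =====
def classifyB (min_indent : Int) (line : String) : String :=
  let s := PySem.Str.strip line
  if PySem.Str.len line - PySem.Str.len (PySem.Str.lstrip line) < min_indent then "stop"
  else if PySem.Str.startswith s "if " || PySem.Str.startswith s "elif "
          || PySem.Str.startswith s "else:" then "branch"
  else if PySem.Str.len s ≠ 0 && !(PySem.Str.startswith line "    ")
          && !(PySem.Str.startswith line "\t") then "stop"
  else "skip"

-- backward pass ('for line in reversed(lines)') = right fold over lines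
def count_nesting_py_alt (lines : List String) (min_indent : Int) : Int :=
  lines.foldr
    (fun line nesting =>
      let k := classifyB min_indent line
      if k = "stop" then 0
      else if k = "branch" then nesting + 1
      else nesting)
    0

-- ===== PRECONDITION & SPEC =====
def Spec_count_nesting_py (lines : List String) (min_indent : Int) (out : Int) : Prop := out = count_nesting_py_alt lines min_indent
instance (lines : List String) (min_indent : Int) (out : Int) : Decidable (Spec_count_nesting_py lines min_indent out) := by unfold Spec_count_nesting_py; infer_instance

-- ===== CLAIM (what is proved, stated in full; the proofs are below) =====
def Claim_equal_count_nesting_py : Prop := ∀ (lines : List String) (min_indent : Int), Dom_count_nesting_py lines min_indent → Spec_count_nesting_py lines min_indent (count_nesting_py lines min_indent)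

-- ===== LEMMAS AND PROOFS =====
-- Invariant: A's two counters stay equal, so the loop from state (n, n) returns
-- n plus B's right-fold value (a stop head makes the fold 0, matching A's break with maxN = n).
set_option maxHeartbeats 1600000 in
lemma countNestLoopA_eq (min_indent : Int) (lines : List String) (n : Int) :
    countNestLoopA min_indent lines n n = n + count_nesting_py_alt lines min_indent := by
  induction lines generalizing n with
  | nil => simp [countNestLoopA, count_nesting_py_alt]
  | cons line rest ih =>
    simp only [countNestLoopA, count_nesting_py_alt, List.foldr_cons]
    by_cases hlt : PySem.Str.len line - PySem.Str.len (PySem.Str.lstrip line) < min_indent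
    · have hk : classifyB min_indent line = "stop" := by
        simp only [classifyB]; rw [if_pos hlt]
      rw [if_pos hlt, hk, if_pos rfl]; ring
    · rw [if_neg hlt]
      by_cases h1 : (PySem.Str.startswith (PySem.Str.strip line) "if "
          || PySem.Str.startswith (PySem.Str.strip line) "elif ") = true
      · have hk : classifyB min_indent line = "branch" := by
          simp only [classifyB]
          rw [if_neg hlt, if_pos (by simp only [Bool.or_eq_true] at h1 ⊢; tauto)]
        rw [if_pos h1, hk, if_neg (by decide), if_pos rfl,
          show max n (n + 1) = n + 1 by omega,
          ih (n + 1)]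
        simp only [count_nesting_py_alt]; ring
      · rw [if_neg h1]
        by_cases h2 : PySem.Str.startswith (PySem.Str.strip line) "else:" = true
        · have hk : classifyB min_indent line = "branch" := by
            simp only [classifyB]
            rw [if_neg hlt, if_pos (by simp only [Bool.or_eq_true]; tauto)]
          rw [if_pos h2, hk, if_neg (by decide), if_pos rfl,
            show max n (n + 1) = n + 1 by omega,
            ih (n + 1)]
          simp only [count_nesting_py_alt]; ring
        · rw [if_neg h2]
          have hnb : (PySem.Str.startswith (PySem.Str.strip line) "if "
              || PySem.Str.startswith (PySem.Str.strip line) "elif "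
              || PySem.Str.startswith (PySem.Str.strip line) "else:") = false := by
            rw [Bool.eq_false_iff.mpr h1, Bool.eq_false_iff.mpr h2]
            decide
          by_cases hbrk : (PySem.Str.len (PySem.Str.strip line) ≠ 0
              && !(PySem.Str.startswith line "    ") && !(PySem.Str.startswith line "\t")) = true
          · have hk : classifyB min_indent line = "stop" := by
              simp only [classifyB]
              rw [if_neg hlt, if_neg (by rw [hnb]; decide), if_pos hbrk]
            rw [if_pos hbrk, hk, if_pos rfl]; ring
          · have hk : classifyB min_indent line = "skip" := by
              simp only [classifyB]
              rw [if_neg hlt, if_neg (by rw [hnb]; decide), if_neg hbrk]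
            rw [if_neg hbrk, hk, if_neg (by decide), if_neg (by decide), ih n]
            simp only [count_nesting_py_alt]

-- ===== VERDICT (by name: the statement is the Claim_ definition above) =====
theorem count_nesting_py_spec : Claim_equal_count_nesting_py := by
  intro lines min_indent _
  unfold Spec_count_nesting_py count_nesting_py
  simpa using countNestLoopA_eq min_indent lines 0
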